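-- pv_equiv track=rewrite | github.com/DreamOnRain/smc-tts | chinese.py | process_continue_pause
-- ===== SOURCE A (Python) =====
-- def process_continue_pause(text):
--     # text = replace_comma(text)
--     max_num = 0
--     new_text = []
--     flag = False
--     for char in text:
--         if char == '#':
--             flag = True
--         if flag:
--             if char.isdigit():
--                 max_num = max(max_num, int(char))
--                 continue
--             elif char == '#':
--                 pass
--                 continue
--             else:
--                 flag = False
--                 new_text.append(f'#{max_num}')
--                 max_num = 0
--         new_text.append(char)
--     return ''.join(new_text)
-- ===== SOURCE B (Python) =====
-- def process_continue_pause(text):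
--     out = []
--     i = 0
--     n = len(text)
--     while i < n:
--         c = text[i]
--         if c != '#':
--             out.append(c)
--             i += 1
--             continue
--         j = i
--         while j < n and (text[j] == '#' or text[j].isdigit()):
--             j += 1
--         m = max((int(ch) for ch in text[i:j] if ch.isdigit()), default=0)
--         if j == n:
--             break
--         out.append('#' + str(m))
--         out.append(text[j])
--         i = j + 1
--     return ''.join(out)
-- ===== Notes on version B (the rewrite author's own statement) =====
-- stated objective: alternative
-- what changed: Replaces A's single fold with a boolean flag and running max carried across iterations by an index-based two-pointer scan: an inner loop consumes each maximal '#'/digit run at once, the run's max digit is reduced over the slice, and a trailing run at end of string is dropped by an explicit break.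
import Mathlib
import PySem

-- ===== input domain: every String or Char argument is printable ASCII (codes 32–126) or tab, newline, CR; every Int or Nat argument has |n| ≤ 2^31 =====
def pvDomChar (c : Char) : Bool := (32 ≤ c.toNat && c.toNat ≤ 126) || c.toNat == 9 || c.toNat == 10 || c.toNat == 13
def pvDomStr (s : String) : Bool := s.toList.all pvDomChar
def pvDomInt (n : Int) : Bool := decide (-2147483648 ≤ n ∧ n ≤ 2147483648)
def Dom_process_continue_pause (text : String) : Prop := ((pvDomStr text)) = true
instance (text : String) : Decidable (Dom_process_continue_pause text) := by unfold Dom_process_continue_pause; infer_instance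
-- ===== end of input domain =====

-- B replaces A's flag-carrying fold by a two-pointer scan consuming each maximal '#'/digit run at once (alternative decomposition, same cost).


-- int(c) for a single ASCII digit character (exact: used only when isdigit c)
def pvDigitVal (c : Char) : Int := (c.toNat : Int) - 48

-- ===== PORT A =====
-- state = (max_num, flag, new_text); one step of A's for-loop body
def pvAStep (st : Int × Bool × List String) (c : Char) : Int × Bool × List String :=
  let max_num := st.1
  let flag := if c = '#' then true else st.2.1
  let new_text := st.2.2
  if flag then
    if PySem.Chars.isdigit c then (max max_num (pvDigitVal c), flag, new_text)
    else if c = '#' then (max_num, flag, new_text)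
    else (0, false, new_text ++ ["#" ++ PySem.Int.toStr max_num, String.ofList [c]])
  else (max_num, flag, new_text ++ [String.ofList [c]])

def process_continue_pause (text : String) : String :=
  String.join (text.toList.foldl pvAStep (0, false, [])).2.2

-- ===== PORT B =====
-- run predicate of B's inner while loop
def pvRunP (c : Char) : Bool := c = '#' || PySem.Chars.isdigit c

-- max((int(ch) for ch in slice if ch.isdigit()), default=0)
def pvMaxDigit (run : List Char) : Int :=
  run.foldl (fun m c => if PySem.Chars.isdigit c then max m (pvDigitVal c) else m) 0

def pvBGo : List Char → List String
  | [] => []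
  | c :: cs =>
    if c = '#' then
      match hrest : List.dropWhile pvRunP cs with
      | [] => []
      | d :: ds =>
        ("#" ++ PySem.Int.toStr (pvMaxDigit (c :: List.takeWhile pvRunP cs)))
          :: String.ofList [d] :: pvBGo ds
    else String.ofList [c] :: pvBGo cs
termination_by l => l.length
decreasing_by
  · have h1 : (List.dropWhile pvRunP cs).length ≤ cs.length := by
      simpa using List.length_dropWhile_le pvRunP cs
    rw [hrest] at h1
    simp at h1 ⊢
    omega
  · simp

def process_continue_pause_alt (text : String) : String :=
  String.join (pvBGo text.toList)

-- ===== PRECONDITION & SPEC =====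
def Spec_process_continue_pause (text : String) (out : String) : Prop := out = process_continue_pause_alt text
instance (text : String) (out : String) : Decidable (Spec_process_continue_pause text out) := by unfold Spec_process_continue_pause; infer_instance

-- ===== CLAIM (what is proved, stated in full; the proofs are below) =====
def Claim_equal_process_continue_pause : Prop := ∀ (text : String), Dom_process_continue_pause text → Spec_process_continue_pause text (process_continue_pause text)

-- ===== LEMMAS AND PROOFS =====

-- the joined output of running A's loop from a given state
def pvOutA (st : Int × Bool × List String) (l : List Char) : String :=
  String.join (l.foldl pvAStep st).2.2

-- fold of B's max-digit reduction started from m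
def pvMaxFrom (m : Int) (run : List Char) : Int :=
  run.foldl (fun m c => if PySem.Chars.isdigit c then max m (pvDigitVal c) else m) m

theorem foldl_append_shift (l : List String) (a : String) :
    List.foldl (fun r s => r ++ s) a l = a ++ List.foldl (fun r s => r ++ s) "" l := by
  induction l generalizing a with
  | nil => simp
  | cons s t ih => simp only [List.foldl]; rw [ih (a ++ s), ih ("" ++ s)]; simp [String.append_assoc]

theorem join_cons (s : String) (l : List String) :
    String.join (s :: l) = s ++ String.join l := by
  simp only [String.join, List.foldl]
  rw [foldl_append_shift]
  simp

theorem join_append (a b : List String) :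
    String.join (a ++ b) = String.join a ++ String.join b := by
  induction a with
  | nil => simp [String.join]
  | cons s t ih => simp [join_cons, ih, String.append_assoc]

-- unfolding lemmas for pvBGo (the dependent match blocks plain simp)
theorem join_nil : String.join ([] : List String) = "" := rfl

theorem join_singleton (s : String) : String.join [s] = s := by
  rw [join_cons]; simp [join_nil]

theorem pvBGo_nonhash (c : Char) (cs : List Char) (h : ¬ c = '#') :
    pvBGo (c :: cs) = String.ofList [c] :: pvBGo cs := by
  rw [pvBGo]; simp [h]

theorem pvBGo_hash_nil (cs : List Char) (h : List.dropWhile pvRunP cs = []) :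
    pvBGo ('#' :: cs) = [] := by
  rw [pvBGo]
  split
  · split <;> simp_all
  · simp_all

theorem pvBGo_hash_cons (cs : List Char) (d : Char) (ds : List Char)
    (h : List.dropWhile pvRunP cs = d :: ds) :
    pvBGo ('#' :: cs) =
      ("#" ++ PySem.Int.toStr (pvMaxDigit ('#' :: List.takeWhile pvRunP cs)))
        :: String.ofList [d] :: pvBGo ds := by
  rw [pvBGo]
  split
  · split <;> simp_all
  · simp_all

-- A's loop while flag is set consumes the maximal '#'/digit run:
-- trailing run at the end of the text is dropped …
theorem pvOutA_flag_nil (l : List Char) (m : Int) (acc : List String)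
    (h : List.dropWhile pvRunP l = []) :
    pvOutA (m, true, acc) l = String.join acc := by
  induction l generalizing m with
  | nil => simp [pvOutA]
  | cons c cs ih =>
    have hp : pvRunP c = true := by
      by_contra hp
      simp [List.dropWhile_cons, hp] at h
    have hstep : pvAStep (m, true, acc) c =
        ((if PySem.Chars.isdigit c then max m (pvDigitVal c) else m), true, acc) := by
      by_cases hh : c = '#'
      · subst hh
        simp [pvAStep, show PySem.Chars.isdigit '#' = false from by decide]
      · have hd : PySem.Chars.isdigit c = true := by
          simp only [pvRunP, Bool.or_eq_true, decide_eq_true_eq] at hp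
          tauto
        simp [pvAStep, hh, hd]
    have h' : List.dropWhile pvRunP cs = [] := by
      simpa [List.dropWhile_cons, hp] using h
    calc pvOutA (m, true, acc) (c :: cs)
        = pvOutA ((if PySem.Chars.isdigit c then max m (pvDigitVal c) else m), true, acc) cs := by
          simp [pvOutA, hstep]
      _ = String.join acc := ih _ h'

-- … and an interior run emits "#max" plus the breaking char and resets the state.
theorem pvOutA_flag_cons (l : List Char) (m : Int) (acc : List String) (d : Char) (ds : List Char)
    (h : List.dropWhile pvRunP l = d :: ds) :
    pvOutA (m, true, acc) l =
      pvOutA (0, false,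
        acc ++ ["#" ++ PySem.Int.toStr (pvMaxFrom m (List.takeWhile pvRunP l)),
                String.ofList [d]]) ds := by
  induction l generalizing m with
  | nil => cases h
  | cons c cs ih =>
    by_cases hp : pvRunP c = true
    · have hstep : pvAStep (m, true, acc) c =
          ((if PySem.Chars.isdigit c then max m (pvDigitVal c) else m), true, acc) := by
        by_cases hh : c = '#'
        · subst hh
          simp [pvAStep, show PySem.Chars.isdigit '#' = false from by decide]
        · have hd : PySem.Chars.isdigit c = true := by
            simp only [pvRunP, Bool.or_eq_true, decide_eq_true_eq] at hp
            tauto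
          simp [pvAStep, hh, hd]
      have h' : List.dropWhile pvRunP cs = d :: ds := by
        simpa [List.dropWhile_cons, hp] using h
      rw [show pvOutA (m, true, acc) (c :: cs)
            = pvOutA ((if PySem.Chars.isdigit c then max m (pvDigitVal c) else m), true, acc) cs by
          simp [pvOutA, hstep]]
      rw [ih _ h']
      simp [List.takeWhile_cons, hp, pvMaxFrom]
    · have hnh : ¬ c = '#' := fun hh => hp (by simp [pvRunP, hh])
      have hnd : ¬ PySem.Chars.isdigit c = true := fun hd => hp (by simp [pvRunP, hd])
      have hdc : c = d ∧ cs = ds := by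
        rw [List.dropWhile_cons, if_neg (by simp [hp])] at h
        exact ⟨(List.cons.injEq ..).mp h |>.1, (List.cons.injEq ..).mp h |>.2⟩
      obtain ⟨rfl, rfl⟩ := hdc
      have hstep : pvAStep (m, true, acc) c =
          (0, false, acc ++ ["#" ++ PySem.Int.toStr m, String.ofList [c]]) := by
        simp [pvAStep, hnh, hnd]
      simp [pvOutA, hstep, List.takeWhile_cons, hp, pvMaxFrom]

-- main invariant: A from the neutral state equals acc followed by B's output
theorem pvOutA_eq (l : List Char) (acc : List String) :
    pvOutA (0, false, acc) l = String.join acc ++ String.join (pvBGo l) := by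
  induction hn : l.length using Nat.strong_induction_on generalizing l acc with
  | _ n ih =>
  match l with
  | [] => simp [pvOutA, pvBGo, String.join]
  | c :: cs =>
    by_cases hc : c = '#'
    · subst hc
      have hstep : pvAStep (0, false, acc) '#' = (0, true, acc) := by
        simp [pvAStep, PySem.Chars.isdigit]
      have h1 : pvOutA (0, false, acc) ('#' :: cs) = pvOutA (0, true, acc) cs := by
        simp [pvOutA, hstep]
      cases hrest : List.dropWhile pvRunP cs with
      | nil =>
        rw [h1, pvOutA_flag_nil cs 0 acc hrest, pvBGo_hash_nil cs hrest]
        simp [String.join]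
      | cons d ds =>
        have hlen : ds.length < n := by
          have h2 : (List.dropWhile pvRunP cs).length ≤ cs.length :=
            List.length_dropWhile_le pvRunP cs
          rw [hrest] at h2; simp at h2
          subst hn; simp; omega
        rw [h1, pvOutA_flag_cons cs 0 acc d ds hrest, ih ds.length hlen ds _ rfl,
          pvBGo_hash_cons cs d ds hrest]
        have hmax : pvMaxFrom 0 (List.takeWhile pvRunP cs)
            = pvMaxDigit ('#' :: List.takeWhile pvRunP cs) := by
          simp [pvMaxDigit, pvMaxFrom, PySem.Chars.isdigit]
        rw [hmax]
        simp [join_append, join_cons, join_nil, join_singleton, String.append_assoc]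
    · have hstep : pvAStep (0, false, acc) c = (0, false, acc ++ [String.ofList [c]]) := by
        by_cases hd : PySem.Chars.isdigit c = true
        · simp [pvAStep, hc]
        · simp [pvAStep, hc]
      have h1 : pvOutA (0, false, acc) (c :: cs) = pvOutA (0, false, acc ++ [String.ofList [c]]) cs := by
        simp [pvOutA, hstep]
      have hlen : cs.length < n := by subst hn; simp
      rw [h1, ih cs.length hlen cs _ rfl, pvBGo_nonhash c cs hc]
      simp [join_append, join_cons, join_nil, join_singleton, String.append_assoc]

-- ===== VERDICT (by name: the statement is the Claim_ definition above) =====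
theorem process_continue_pause_spec : Claim_equal_process_continue_pause := by
  intro text _
  unfold Spec_process_continue_pause process_continue_pause process_continue_pause_alt
  have := pvOutA_eq text.toList []
  simpa [pvOutA, String.join] using this
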